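-- pv_equiv track=rewrite | github.com/gfrancopanades/GeoLSTM | src/data/data_utils.py | round_to_nearest_power_of_2
-- ===== SOURCE A (Python) =====
-- def round_to_nearest_power_of_2(number):
--     if number < 32:
--         return 32
--
--     powers_of_2 = [32, 64, 128, 256, 512, 1024, 2048, 4096, 8192, 16384, 32768, 65536]
--
--     for i in range(len(powers_of_2) - 1):
--         lower = powers_of_2[i]
--         upper = powers_of_2[i + 1]
--         if lower <= number < upper:
--             return lower if (number - lower) < (upper - number) else upper
--
--     return powers_of_2[-1]
-- ===== SOURCE B (Python) =====
-- def round_to_nearest_power_of_2(number):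
--     n = min(max(number, 32), 65535)
--     lower = 1 << (n.bit_length() - 1)
--     return lower if 2 * n < 3 * lower else 2 * lower
-- ===== Notes on version B (the rewrite author's own statement) =====
-- stated objective: idiomatic
-- what changed: Replaced the table scan over brackets with a closed form: clamp the input into the supported range, compute the lower bracketing power of two via bit_length, and pick lower or upper by a midpoint comparison.
import Mathlib
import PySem

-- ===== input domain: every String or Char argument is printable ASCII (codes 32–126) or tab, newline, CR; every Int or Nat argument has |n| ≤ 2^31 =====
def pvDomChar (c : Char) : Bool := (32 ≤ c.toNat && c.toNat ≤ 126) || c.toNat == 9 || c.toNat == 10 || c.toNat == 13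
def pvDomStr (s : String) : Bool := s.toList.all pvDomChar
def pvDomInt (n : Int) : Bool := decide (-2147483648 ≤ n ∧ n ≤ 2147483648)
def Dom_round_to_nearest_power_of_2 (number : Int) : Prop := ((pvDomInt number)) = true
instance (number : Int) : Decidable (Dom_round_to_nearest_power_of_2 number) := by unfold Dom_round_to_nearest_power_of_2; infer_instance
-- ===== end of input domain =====

-- B replaces A's powers-of-2 table scan with a closed form: clamp into the supported range,
-- lower bracketing power via bit_length, then a midpoint comparison (objective: idiomatic).

-- ===== PORT A =====
-- the 'for i in range(len(powers_of_2) - 1)' loop, recursing on the index list;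
-- indices come from range so pyGet? is always in range (.getD 0 never fires)
def pvALoop (number : Int) (powers : List Int) : List Int → Int
  | [] => (PySem.List.pyGet? powers (-1)).getD 0
  | i :: rest =>
    let lower := (PySem.List.pyGet? powers i).getD 0
    let upper := (PySem.List.pyGet? powers (i + 1)).getD 0
    if lower ≤ number ∧ number < upper then
      if number - lower < upper - number then lower else upper
    else pvALoop number powers rest

def round_to_nearest_power_of_2 (number : Int) : Int :=
  if number < 32 then 32
  else
    let powers_of_2 : List Int := [32, 64, 128, 256, 512, 1024, 2048, 4096, 8192, 16384, 32768, 65536]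
    pvALoop number powers_of_2 (PySem.List.pyRange 0 ((powers_of_2.length : Int) - 1) 1)

-- ===== PORT B =====
-- n.bit_length() for n ≥ 1 is Nat.log2 n + 1 (exact here: n is clamped into [32, 65535]);
-- '1 << (bl - 1)' is 2 ^ (bl - 1)
def round_to_nearest_power_of_2_alt (number : Int) : Int :=
  let n := min (max number 32) 65535
  let bl : Nat := Nat.log2 n.toNat + 1
  let lower : Int := ((2 ^ (bl - 1) : Nat) : Int)
  if 2 * n < 3 * lower then lower else 2 * lower

-- ===== PRECONDITION & SPEC =====
def Spec_round_to_nearest_power_of_2 (number : Int) (out : Int) : Prop := out = round_to_nearest_power_of_2_alt number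
instance (number : Int) (out : Int) : Decidable (Spec_round_to_nearest_power_of_2 number out) := by unfold Spec_round_to_nearest_power_of_2; infer_instance

-- ===== CLAIM (what is proved, stated in full; the proofs are below) =====
def Claim_equal_round_to_nearest_power_of_2 : Prop := ∀ (number : Int), Dom_round_to_nearest_power_of_2 number → Spec_round_to_nearest_power_of_2 number (round_to_nearest_power_of_2 number)

-- ===== LEMMAS AND PROOFS =====

-- ===== VERDICT (by name: the statement is the Claim_ definition above) =====
set_option maxHeartbeats 1000000 in
theorem round_to_nearest_power_of_2_spec : Claim_equal_round_to_nearest_power_of_2 := by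
  intro n _
  unfold Spec_round_to_nearest_power_of_2
  by_cases h32 : n < 32
  · have hc : min (max n 32) 65535 = (32:Int) := by omega
    rw [round_to_nearest_power_of_2, if_pos h32]
    simp only [round_to_nearest_power_of_2_alt, hc]
    decide
  · have hA : pvALoop n ([32, 64, 128, 256, 512, 1024, 2048, 4096, 8192, 16384, 32768, 65536] : List Int) [0, 1, 2, 3, 4, 5, 6, 7, 8, 9, 10] =
(       if 32 ≤ n ∧ n < 64 then (if n - 32 < 64 - n then (32:Int) else 64)
       else if 64 ≤ n ∧ n < 128 then (if n - 64 < 128 - n then (64:Int) else 128)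
       else if 128 ≤ n ∧ n < 256 then (if n - 128 < 256 - n then (128:Int) else 256)
       else if 256 ≤ n ∧ n < 512 then (if n - 256 < 512 - n then (256:Int) else 512)
       else if 512 ≤ n ∧ n < 1024 then (if n - 512 < 1024 - n then (512:Int) else 1024)
       else if 1024 ≤ n ∧ n < 2048 then (if n - 1024 < 2048 - n then (1024:Int) else 2048)
       else if 2048 ≤ n ∧ n < 4096 then (if n - 2048 < 4096 - n then (2048:Int) else 4096)
       else if 4096 ≤ n ∧ n < 8192 then (if n - 4096 < 8192 - n then (4096:Int) else 8192)
       else if 8192 ≤ n ∧ n < 16384 then (if n - 8192 < 16384 - n then (8192:Int) else 16384)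
       else if 16384 ≤ n ∧ n < 32768 then (if n - 16384 < 32768 - n then (16384:Int) else 32768)
       else if 32768 ≤ n ∧ n < 65536 then (if n - 32768 < 65536 - n then (32768:Int) else 65536)
       else 65536) := rfl
    have hr : PySem.List.pyRange 0 ((([32, 64, 128, 256, 512, 1024, 2048, 4096, 8192, 16384, 32768, 65536] : List Int).length : Int) - 1) 1 = ([0, 1, 2, 3, 4, 5, 6, 7, 8, 9, 10] : List Int) := by decide
    push Not at h32
    unfold round_to_nearest_power_of_2
    rw [if_neg (not_lt.mpr h32)]
    show pvALoop n ([32, 64, 128, 256, 512, 1024, 2048, 4096, 8192, 16384, 32768, 65536] : List Int)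
        (PySem.List.pyRange 0 ((([32, 64, 128, 256, 512, 1024, 2048, 4096, 8192, 16384, 32768, 65536] : List Int).length : Int) - 1) 1) = _
    rw [hr, hA]
    by_cases hHi : 65536 ≤ n
    · have hc : min (max n 32) 65535 = (65535:Int) := by omega
      rw [if_neg (by omega : ¬ ((32:Int) ≤ n ∧ n < 64)),
          if_neg (by omega : ¬ ((64:Int) ≤ n ∧ n < 128)),
          if_neg (by omega : ¬ ((128:Int) ≤ n ∧ n < 256)),
          if_neg (by omega : ¬ ((256:Int) ≤ n ∧ n < 512)),
          if_neg (by omega : ¬ ((512:Int) ≤ n ∧ n < 1024)),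
          if_neg (by omega : ¬ ((1024:Int) ≤ n ∧ n < 2048)),
          if_neg (by omega : ¬ ((2048:Int) ≤ n ∧ n < 4096)),
          if_neg (by omega : ¬ ((4096:Int) ≤ n ∧ n < 8192)),
          if_neg (by omega : ¬ ((8192:Int) ≤ n ∧ n < 16384)),
          if_neg (by omega : ¬ ((16384:Int) ≤ n ∧ n < 32768)),
          if_neg (by omega : ¬ ((32768:Int) ≤ n ∧ n < 65536))]
      simp only [round_to_nearest_power_of_2_alt, hc]
      decide
    · push Not at hHi
      rcases (show ((32:Int) ≤ n ∧ n < 64) ∨ ((64:Int) ≤ n ∧ n < 128) ∨ ((128:Int) ≤ n ∧ n < 256) ∨ ((256:Int) ≤ n ∧ n < 512) ∨ ((512:Int) ≤ n ∧ n < 1024) ∨ ((1024:Int) ≤ n ∧ n < 2048) ∨ ((2048:Int) ≤ n ∧ n < 4096) ∨ ((4096:Int) ≤ n ∧ n < 8192) ∨ ((8192:Int) ≤ n ∧ n < 16384) ∨ ((16384:Int) ≤ n ∧ n < 32768) ∨ ((32768:Int) ≤ n ∧ n < 65536) from by omega) with h|h|h|h|h|h|h|h|h|h|h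
      · -- 32 ≤ n < 64
        have hc : min (max n 32) 65535 = n := by omega
        have hk : Nat.log2 n.toNat = 5 := by
          rw [Nat.log2_eq_log_two]
          exact Nat.log_eq_of_pow_le_of_lt_pow
            (by simp only [show (2:ℕ)^5 = 32 from rfl]; omega)
            (by simp only [show (2:ℕ)^6 = 64 from rfl]; omega)
        have hB : round_to_nearest_power_of_2_alt n = if 2*n < 3*(32:Int) then (32:Int) else 64 := by
          simp only [round_to_nearest_power_of_2_alt, hc, hk]
          norm_num

        rw [if_pos (by omega : ((32:Int) ≤ n ∧ n < 64)), hB]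
        split_ifs <;> omega
      · -- 64 ≤ n < 128
        have hc : min (max n 32) 65535 = n := by omega
        have hk : Nat.log2 n.toNat = 6 := by
          rw [Nat.log2_eq_log_two]
          exact Nat.log_eq_of_pow_le_of_lt_pow
            (by simp only [show (2:ℕ)^6 = 64 from rfl]; omega)
            (by simp only [show (2:ℕ)^7 = 128 from rfl]; omega)
        have hB : round_to_nearest_power_of_2_alt n = if 2*n < 3*(64:Int) then (64:Int) else 128 := by
          simp only [round_to_nearest_power_of_2_alt, hc, hk]
          norm_num
        rw [if_neg (by omega : ¬ ((32:Int) ≤ n ∧ n < 64))]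
        rw [if_pos (by omega : ((64:Int) ≤ n ∧ n < 128)), hB]
        split_ifs <;> omega
      · -- 128 ≤ n < 256
        have hc : min (max n 32) 65535 = n := by omega
        have hk : Nat.log2 n.toNat = 7 := by
          rw [Nat.log2_eq_log_two]
          exact Nat.log_eq_of_pow_le_of_lt_pow
            (by simp only [show (2:ℕ)^7 = 128 from rfl]; omega)
            (by simp only [show (2:ℕ)^8 = 256 from rfl]; omega)
        have hB : round_to_nearest_power_of_2_alt n = if 2*n < 3*(128:Int) then (128:Int) else 256 := by
          simp only [round_to_nearest_power_of_2_alt, hc, hk]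
          norm_num
        rw [if_neg (by omega : ¬ ((32:Int) ≤ n ∧ n < 64))]
        rw [if_neg (by omega : ¬ ((64:Int) ≤ n ∧ n < 128))]
        rw [if_pos (by omega : ((128:Int) ≤ n ∧ n < 256)), hB]
        split_ifs <;> omega
      · -- 256 ≤ n < 512
        have hc : min (max n 32) 65535 = n := by omega
        have hk : Nat.log2 n.toNat = 8 := by
          rw [Nat.log2_eq_log_two]
          exact Nat.log_eq_of_pow_le_of_lt_pow
            (by simp only [show (2:ℕ)^8 = 256 from rfl]; omega)
            (by simp only [show (2:ℕ)^9 = 512 from rfl]; omega)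
        have hB : round_to_nearest_power_of_2_alt n = if 2*n < 3*(256:Int) then (256:Int) else 512 := by
          simp only [round_to_nearest_power_of_2_alt, hc, hk]
          norm_num
        rw [if_neg (by omega : ¬ ((32:Int) ≤ n ∧ n < 64))]
        rw [if_neg (by omega : ¬ ((64:Int) ≤ n ∧ n < 128))]
        rw [if_neg (by omega : ¬ ((128:Int) ≤ n ∧ n < 256))]
        rw [if_pos (by omega : ((256:Int) ≤ n ∧ n < 512)), hB]
        split_ifs <;> omega
      · -- 512 ≤ n < 1024
        have hc : min (max n 32) 65535 = n := by omega
        have hk : Nat.log2 n.toNat = 9 := by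
          rw [Nat.log2_eq_log_two]
          exact Nat.log_eq_of_pow_le_of_lt_pow
            (by simp only [show (2:ℕ)^9 = 512 from rfl]; omega)
            (by simp only [show (2:ℕ)^10 = 1024 from rfl]; omega)
        have hB : round_to_nearest_power_of_2_alt n = if 2*n < 3*(512:Int) then (512:Int) else 1024 := by
          simp only [round_to_nearest_power_of_2_alt, hc, hk]
          norm_num
        rw [if_neg (by omega : ¬ ((32:Int) ≤ n ∧ n < 64))]
        rw [if_neg (by omega : ¬ ((64:Int) ≤ n ∧ n < 128))]
        rw [if_neg (by omega : ¬ ((128:Int) ≤ n ∧ n < 256))]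
        rw [if_neg (by omega : ¬ ((256:Int) ≤ n ∧ n < 512))]
        rw [if_pos (by omega : ((512:Int) ≤ n ∧ n < 1024)), hB]
        split_ifs <;> omega
      · -- 1024 ≤ n < 2048
        have hc : min (max n 32) 65535 = n := by omega
        have hk : Nat.log2 n.toNat = 10 := by
          rw [Nat.log2_eq_log_two]
          exact Nat.log_eq_of_pow_le_of_lt_pow
            (by simp only [show (2:ℕ)^10 = 1024 from rfl]; omega)
            (by simp only [show (2:ℕ)^11 = 2048 from rfl]; omega)
        have hB : round_to_nearest_power_of_2_alt n = if 2*n < 3*(1024:Int) then (1024:Int) else 2048 := by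
          simp only [round_to_nearest_power_of_2_alt, hc, hk]
          norm_num
        rw [if_neg (by omega : ¬ ((32:Int) ≤ n ∧ n < 64))]
        rw [if_neg (by omega : ¬ ((64:Int) ≤ n ∧ n < 128))]
        rw [if_neg (by omega : ¬ ((128:Int) ≤ n ∧ n < 256))]
        rw [if_neg (by omega : ¬ ((256:Int) ≤ n ∧ n < 512))]
        rw [if_neg (by omega : ¬ ((512:Int) ≤ n ∧ n < 1024))]
        rw [if_pos (by omega : ((1024:Int) ≤ n ∧ n < 2048)), hB]
        split_ifs <;> omega
      · -- 2048 ≤ n < 4096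
        have hc : min (max n 32) 65535 = n := by omega
        have hk : Nat.log2 n.toNat = 11 := by
          rw [Nat.log2_eq_log_two]
          exact Nat.log_eq_of_pow_le_of_lt_pow
            (by simp only [show (2:ℕ)^11 = 2048 from rfl]; omega)
            (by simp only [show (2:ℕ)^12 = 4096 from rfl]; omega)
        have hB : round_to_nearest_power_of_2_alt n = if 2*n < 3*(2048:Int) then (2048:Int) else 4096 := by
          simp only [round_to_nearest_power_of_2_alt, hc, hk]
          norm_num
        rw [if_neg (by omega : ¬ ((32:Int) ≤ n ∧ n < 64))]
        rw [if_neg (by omega : ¬ ((64:Int) ≤ n ∧ n < 128))]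
        rw [if_neg (by omega : ¬ ((128:Int) ≤ n ∧ n < 256))]
        rw [if_neg (by omega : ¬ ((256:Int) ≤ n ∧ n < 512))]
        rw [if_neg (by omega : ¬ ((512:Int) ≤ n ∧ n < 1024))]
        rw [if_neg (by omega : ¬ ((1024:Int) ≤ n ∧ n < 2048))]
        rw [if_pos (by omega : ((2048:Int) ≤ n ∧ n < 4096)), hB]
        split_ifs <;> omega
      · -- 4096 ≤ n < 8192
        have hc : min (max n 32) 65535 = n := by omega
        have hk : Nat.log2 n.toNat = 12 := by
          rw [Nat.log2_eq_log_two]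
          exact Nat.log_eq_of_pow_le_of_lt_pow
            (by simp only [show (2:ℕ)^12 = 4096 from rfl]; omega)
            (by simp only [show (2:ℕ)^13 = 8192 from rfl]; omega)
        have hB : round_to_nearest_power_of_2_alt n = if 2*n < 3*(4096:Int) then (4096:Int) else 8192 := by
          simp only [round_to_nearest_power_of_2_alt, hc, hk]
          norm_num
        rw [if_neg (by omega : ¬ ((32:Int) ≤ n ∧ n < 64))]
        rw [if_neg (by omega : ¬ ((64:Int) ≤ n ∧ n < 128))]
        rw [if_neg (by omega : ¬ ((128:Int) ≤ n ∧ n < 256))]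
        rw [if_neg (by omega : ¬ ((256:Int) ≤ n ∧ n < 512))]
        rw [if_neg (by omega : ¬ ((512:Int) ≤ n ∧ n < 1024))]
        rw [if_neg (by omega : ¬ ((1024:Int) ≤ n ∧ n < 2048))]
        rw [if_neg (by omega : ¬ ((2048:Int) ≤ n ∧ n < 4096))]
        rw [if_pos (by omega : ((4096:Int) ≤ n ∧ n < 8192)), hB]
        split_ifs <;> omega
      · -- 8192 ≤ n < 16384
        have hc : min (max n 32) 65535 = n := by omega
        have hk : Nat.log2 n.toNat = 13 := by
          rw [Nat.log2_eq_log_two]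
          exact Nat.log_eq_of_pow_le_of_lt_pow
            (by simp only [show (2:ℕ)^13 = 8192 from rfl]; omega)
            (by simp only [show (2:ℕ)^14 = 16384 from rfl]; omega)
        have hB : round_to_nearest_power_of_2_alt n = if 2*n < 3*(8192:Int) then (8192:Int) else 16384 := by
          simp only [round_to_nearest_power_of_2_alt, hc, hk]
          norm_num
        rw [if_neg (by omega : ¬ ((32:Int) ≤ n ∧ n < 64))]
        rw [if_neg (by omega : ¬ ((64:Int) ≤ n ∧ n < 128))]
        rw [if_neg (by omega : ¬ ((128:Int) ≤ n ∧ n < 256))]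
        rw [if_neg (by omega : ¬ ((256:Int) ≤ n ∧ n < 512))]
        rw [if_neg (by omega : ¬ ((512:Int) ≤ n ∧ n < 1024))]
        rw [if_neg (by omega : ¬ ((1024:Int) ≤ n ∧ n < 2048))]
        rw [if_neg (by omega : ¬ ((2048:Int) ≤ n ∧ n < 4096))]
        rw [if_neg (by omega : ¬ ((4096:Int) ≤ n ∧ n < 8192))]
        rw [if_pos (by omega : ((8192:Int) ≤ n ∧ n < 16384)), hB]
        split_ifs <;> omega
      · -- 16384 ≤ n < 32768
        have hc : min (max n 32) 65535 = n := by omega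
        have hk : Nat.log2 n.toNat = 14 := by
          rw [Nat.log2_eq_log_two]
          exact Nat.log_eq_of_pow_le_of_lt_pow
            (by simp only [show (2:ℕ)^14 = 16384 from rfl]; omega)
            (by simp only [show (2:ℕ)^15 = 32768 from rfl]; omega)
        have hB : round_to_nearest_power_of_2_alt n = if 2*n < 3*(16384:Int) then (16384:Int) else 32768 := by
          simp only [round_to_nearest_power_of_2_alt, hc, hk]
          norm_num
        rw [if_neg (by omega : ¬ ((32:Int) ≤ n ∧ n < 64))]
        rw [if_neg (by omega : ¬ ((64:Int) ≤ n ∧ n < 128))]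
        rw [if_neg (by omega : ¬ ((128:Int) ≤ n ∧ n < 256))]
        rw [if_neg (by omega : ¬ ((256:Int) ≤ n ∧ n < 512))]
        rw [if_neg (by omega : ¬ ((512:Int) ≤ n ∧ n < 1024))]
        rw [if_neg (by omega : ¬ ((1024:Int) ≤ n ∧ n < 2048))]
        rw [if_neg (by omega : ¬ ((2048:Int) ≤ n ∧ n < 4096))]
        rw [if_neg (by omega : ¬ ((4096:Int) ≤ n ∧ n < 8192))]
        rw [if_neg (by omega : ¬ ((8192:Int) ≤ n ∧ n < 16384))]
        rw [if_pos (by omega : ((16384:Int) ≤ n ∧ n < 32768)), hB]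
        split_ifs <;> omega
      · -- 32768 ≤ n < 65536
        have hc : min (max n 32) 65535 = n := by omega
        have hk : Nat.log2 n.toNat = 15 := by
          rw [Nat.log2_eq_log_two]
          exact Nat.log_eq_of_pow_le_of_lt_pow
            (by simp only [show (2:ℕ)^15 = 32768 from rfl]; omega)
            (by simp only [show (2:ℕ)^16 = 65536 from rfl]; omega)
        have hB : round_to_nearest_power_of_2_alt n = if 2*n < 3*(32768:Int) then (32768:Int) else 65536 := by
          simp only [round_to_nearest_power_of_2_alt, hc, hk]
          norm_num
        rw [if_neg (by omega : ¬ ((32:Int) ≤ n ∧ n < 64))]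
        rw [if_neg (by omega : ¬ ((64:Int) ≤ n ∧ n < 128))]
        rw [if_neg (by omega : ¬ ((128:Int) ≤ n ∧ n < 256))]
        rw [if_neg (by omega : ¬ ((256:Int) ≤ n ∧ n < 512))]
        rw [if_neg (by omega : ¬ ((512:Int) ≤ n ∧ n < 1024))]
        rw [if_neg (by omega : ¬ ((1024:Int) ≤ n ∧ n < 2048))]
        rw [if_neg (by omega : ¬ ((2048:Int) ≤ n ∧ n < 4096))]
        rw [if_neg (by omega : ¬ ((4096:Int) ≤ n ∧ n < 8192))]
        rw [if_neg (by omega : ¬ ((8192:Int) ≤ n ∧ n < 16384))]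
        rw [if_neg (by omega : ¬ ((16384:Int) ≤ n ∧ n < 32768))]
        rw [if_pos (by omega : ((32768:Int) ≤ n ∧ n < 65536)), hB]
        split_ifs <;> omega
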